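-- pv_equiv track=rewrite | github.com/edgar-323/leetcode | factorial.py | doubleListSize
-- ===== SOURCE A (Python) =====
-- def doubleListSize(arr):
-- 	newArr = list()
-- 	for i in range(2 * len(arr)):
-- 		if (i < len(arr)):
-- 			newArr.append(arr[i])
-- 		else:
-- 			newArr.append(0)
-- 	return newArr;
-- ===== SOURCE B (Python) =====
-- def doubleListSize(arr):
--     return list(arr) + [0] * len(arr)
-- ===== Notes on version B (the rewrite author's own statement) =====
-- stated objective: simpler
-- what changed: Replaces the indexed 2n loop with a branch by a direct concatenation of a copy of the list with a zero block of equal length.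
import Mathlib
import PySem

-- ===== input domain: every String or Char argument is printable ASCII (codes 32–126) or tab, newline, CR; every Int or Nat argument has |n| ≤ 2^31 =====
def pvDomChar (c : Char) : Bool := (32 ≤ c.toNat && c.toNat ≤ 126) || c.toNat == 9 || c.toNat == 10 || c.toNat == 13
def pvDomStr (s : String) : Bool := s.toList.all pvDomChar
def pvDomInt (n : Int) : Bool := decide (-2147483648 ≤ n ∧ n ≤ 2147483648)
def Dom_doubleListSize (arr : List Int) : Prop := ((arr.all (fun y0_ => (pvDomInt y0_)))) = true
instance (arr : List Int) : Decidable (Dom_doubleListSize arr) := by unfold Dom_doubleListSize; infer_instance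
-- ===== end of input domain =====

-- B replaces A's indexed 2n-step loop with a direct concatenation list(arr) + [0]*len(arr); simpler.

-- ===== PORT A =====
-- For i < len(arr) the index is in range, so pyGetD with default 0 is exact (the default is never used).
def doubleListSize (arr : List Int) : List Int :=
  (PySem.List.pyRange 0 (2 * arr.length) 1).foldl
    (fun newArr i =>
      if i < (arr.length : Int) then newArr ++ [PySem.List.pyGetD arr i 0]
      else newArr ++ [0]) []

-- ===== PORT B =====
def doubleListSize_alt (arr : List Int) : List Int :=
  arr ++ List.replicate arr.length 0

-- ===== PRECONDITION & SPEC =====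
def Spec_doubleListSize (arr : List Int) (out : List Int) : Prop := out = doubleListSize_alt arr
instance (arr : List Int) (out : List Int) : Decidable (Spec_doubleListSize arr out) := by unfold Spec_doubleListSize; infer_instance

-- ===== CLAIM (what is proved, stated in full; the proofs are below) =====
def Claim_equal_doubleListSize : Prop := ∀ (arr : List Int), Dom_doubleListSize arr → Spec_doubleListSize arr (doubleListSize arr)

-- ===== LEMMAS AND PROOFS =====
theorem pv_map_first (arr : List Int) :
    (PySem.List.pyRange 0 (arr.length : Int) 1).map
      (fun i => if i < (arr.length : Int) then PySem.List.pyGetD arr i 0 else 0) = arr := by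
  rw [List.map_congr_left (g := fun i => PySem.List.pyGetD arr i 0)]
  · exact PySem.List.map_pyGetD_pyRange_zero' arr 0
  · intro i hi
    rw [PySem.List.mem_pyRange_one] at hi
    simp [if_pos hi.2]

theorem pv_map_second (arr : List Int) :
    (PySem.List.pyRange (arr.length : Int) (2 * arr.length) 1).map
      (fun i => if i < (arr.length : Int) then PySem.List.pyGetD arr i 0 else 0)
      = List.replicate arr.length 0 := by
  rw [List.map_congr_left (g := fun _ => (0 : Int))]
  · rw [List.map_const']
    congr 1
    rw [PySem.List.length_pyRange_one]
    omega
  · intro i hi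
    rw [PySem.List.mem_pyRange_one] at hi
    simp [if_neg (by omega : ¬ i < (arr.length : Int))]

-- ===== VERDICT (by name: the statement is the Claim_ definition above) =====
theorem doubleListSize_spec : Claim_equal_doubleListSize := by
  intro arr _
  show _ = _
  unfold doubleListSize doubleListSize_alt
  have h : (fun (newArr : List Int) (i : Int) =>
      if i < (arr.length : Int) then newArr ++ [PySem.List.pyGetD arr i 0] else newArr ++ [0])
      = fun newArr i => newArr ++ [if i < (arr.length : Int) then PySem.List.pyGetD arr i 0 else 0] := by
    funext a i; split <;> rfl
  rw [h, PySem.List.foldl_append_singleton_eq_map,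
    PySem.List.pyRange_one_append 0 (arr.length : Int) (2 * arr.length) (by omega) (by omega),
    List.map_append, pv_map_first, pv_map_second, List.nil_append]
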